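-- pv_equiv track=rewrite | github.com/HenriqueDC2003/Trabalho-de-IA | analise_comparativa_8_rainhas/random_restart_benchmark.py | eh_valida
-- ===== SOURCE A (Python) =====
-- NUM_RAINHAS = 8
--
-- def eh_valida(solucao):
--     """Verifica se uma solução é válida (nenhuma rainha se ataca)."""
--     if not solucao or len(solucao) != NUM_RAINHAS:
--         return False
--     for i in range(NUM_RAINHAS):
--         for j in range(i + 1, NUM_RAINHAS):
--             if solucao[i] == solucao[j] or abs(solucao[i] - solucao[j]) == abs(i - j):
--                 return False
--     return True
-- ===== SOURCE B (Python) =====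
-- NUM_RAINHAS = 8
--
-- def eh_valida(solucao):
--     """Verifica se uma solução é válida (nenhuma rainha se ataca)."""
--     if not solucao or len(solucao) != NUM_RAINHAS:
--         return False
--     cols = set()
--     diags = set()
--     adiags = set()
--     for i, v in enumerate(solucao):
--         if v in cols or (i - v) in diags or (i + v) in adiags:
--             return False
--         cols.add(v)
--         diags.add(i - v)
--         adiags.add(i + v)
--     return True
-- ===== Notes on version B (the rewrite author's own statement) =====
-- stated objective: idiomatic
-- what changed: Replaced the O(N^2) pairwise scan with a single pass that maintains three sets (columns, diagonals i-v, anti-diagonals i+v) and rejects on a membership hit.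
import Mathlib
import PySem

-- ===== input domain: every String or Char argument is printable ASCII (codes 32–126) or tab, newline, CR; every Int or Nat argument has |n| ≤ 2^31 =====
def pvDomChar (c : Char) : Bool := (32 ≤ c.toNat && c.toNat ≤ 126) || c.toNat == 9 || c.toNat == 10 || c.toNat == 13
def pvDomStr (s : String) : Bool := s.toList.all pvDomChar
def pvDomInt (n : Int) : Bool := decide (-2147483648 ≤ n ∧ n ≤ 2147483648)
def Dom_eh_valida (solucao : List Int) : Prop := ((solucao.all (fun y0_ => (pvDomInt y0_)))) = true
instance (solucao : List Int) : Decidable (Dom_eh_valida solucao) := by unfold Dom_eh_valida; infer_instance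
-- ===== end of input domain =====

-- B replaces A's O(N^2) pairwise scan with a single pass that maintains three sets
-- (columns, diagonals i-v, anti-diagonals i+v); same return value on every input.

-- ===== PORT A =====
-- indices from range(8)/range(i+1,8) are in bounds once the length guard passed, so pyGetD is exact here
def eh_valida (solucao : List Int) : Bool :=
  if solucao = [] ∨ (solucao.length : Int) ≠ 8 then false
  else (PySem.List.pyRange 0 8 1).all (fun i =>
    (PySem.List.pyRange (i + 1) 8 1).all (fun j =>
      !(PySem.List.pyGetD solucao i 0 == PySem.List.pyGetD solucao j 0 ||
        (PySem.List.pyGetD solucao i 0 - PySem.List.pyGetD solucao j 0).natAbs == (i - j).natAbs)))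

-- ===== PORT B =====
def ehValidaAltLoop : List (Int × Int) → PySem.Set Int → PySem.Set Int → PySem.Set Int → Bool
  | [], _, _, _ => true
  | (i, v) :: rest, cols, diags, adiags =>
    if PySem.Set.contains cols v || PySem.Set.contains diags (i - v) ||
       PySem.Set.contains adiags (i + v) then false
    else ehValidaAltLoop rest (PySem.Set.add cols v) (PySem.Set.add diags (i - v))
           (PySem.Set.add adiags (i + v))

def eh_valida_alt (solucao : List Int) : Bool :=
  if solucao = [] ∨ (solucao.length : Int) ≠ 8 then false
  else ehValidaAltLoop (PySem.List.enumerate solucao 0)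
         PySem.Set.empty PySem.Set.empty PySem.Set.empty

-- ===== PRECONDITION & SPEC =====
def Spec_eh_valida (solucao : List Int) (out : Bool) : Prop := out = eh_valida_alt solucao
instance (solucao : List Int) (out : Bool) : Decidable (Spec_eh_valida solucao out) := by unfold Spec_eh_valida; infer_instance

-- ===== CLAIM (what is proved, stated in full; the proofs are below) =====
def Claim_equal_eh_valida : Prop := ∀ (solucao : List Int), Dom_eh_valida solucao → Spec_eh_valida solucao (eh_valida solucao)

-- ===== LEMMAS AND PROOFS =====

-- B's loop with the sets replaced by plain cons-lists (membership is all that matters)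
def loopC : List (Int × Int) → List Int → List Int → List Int → Bool
  | [], _, _, _ => true
  | (i, v) :: rest, cols, diags, adiags =>
    if v ∈ cols ∨ (i - v) ∈ diags ∨ (i + v) ∈ adiags then false
    else loopC rest (v :: cols) ((i - v) :: diags) ((i + v) :: adiags)

theorem loop_eq_loopC : ∀ (l : List (Int × Int)) (c1 c2 d1 d2 a1 a2 : List Int),
    (∀ x, x ∈ c1 ↔ x ∈ c2) → (∀ x, x ∈ d1 ↔ x ∈ d2) → (∀ x, x ∈ a1 ↔ x ∈ a2) →
    ehValidaAltLoop l c1 d1 a1 = loopC l c2 d2 a2 := by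
  intro l
  induction l with
  | nil => intro _ _ _ _ _ _ _ _ _; rfl
  | cons p rest ih =>
    intro c1 c2 d1 d2 a1 a2 hc hd ha
    obtain ⟨i, v⟩ := p
    simp only [ehValidaAltLoop, loopC]
    have key : (PySem.Set.contains c1 v || PySem.Set.contains d1 (i - v) ||
        PySem.Set.contains a1 (i + v)) = true ↔ (v ∈ c2 ∨ (i - v) ∈ d2 ∨ (i + v) ∈ a2) := by
      simp only [Bool.or_eq_true, PySem.Set.contains_iff, hc, hd, ha]
      tauto
    by_cases hcond : v ∈ c2 ∨ (i - v) ∈ d2 ∨ (i + v) ∈ a2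
    · rw [if_pos hcond, if_pos (key.mpr hcond)]
    · rw [if_neg hcond, if_neg (fun hh => hcond (key.mp hh))]
      exact ih _ _ _ _ _ _
        (fun x => by simp only [PySem.Set.mem_add, hc x, List.mem_cons]; tauto)
        (fun x => by simp only [PySem.Set.mem_add, hd x, List.mem_cons]; tauto)
        (fun x => by simp only [PySem.Set.mem_add, ha x, List.mem_cons]; tauto)

theorem loopC_iff : ∀ (ps : List (Int × Int)) (cols diags adiags : List Int),
    loopC ps cols diags adiags = true ↔
    ∀ (i : Nat) (h : i < ps.length),
      ((ps[i].2 ∉ cols ∧ ps[i].1 - ps[i].2 ∉ diags ∧ ps[i].1 + ps[i].2 ∉ adiags) ∧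
       ∀ (j : Nat) (hj : j < i), ¬(ps[i].2 = (ps[j]'(by omega)).2 ∨
          ps[i].1 - ps[i].2 = (ps[j]'(by omega)).1 - (ps[j]'(by omega)).2 ∨
          ps[i].1 + ps[i].2 = (ps[j]'(by omega)).1 + (ps[j]'(by omega)).2)) := by
  intro ps
  induction ps with
  | nil => intro cols diags adiags; simp [loopC]
  | cons p rest ih =>
    intro cols diags adiags
    obtain ⟨q, v⟩ := p
    simp only [loopC]
    by_cases hc : v ∈ cols ∨ q - v ∈ diags ∨ q + v ∈ adiags
    · rw [if_pos hc]
      simp only [Bool.false_eq_true, false_iff]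
      intro hall
      have h0 := (hall 0 (by simp)).1
      simp only [List.getElem_cons_zero] at h0
      tauto
    · rw [if_neg hc, ih]
      push_neg at hc
      constructor
      · intro hall i hi
        cases i with
        | zero =>
          refine ⟨by simpa using hc, by omega⟩
        | succ n =>
          have hn : n < rest.length := by simpa using hi
          obtain ⟨⟨m1, m2, m3⟩, hp⟩ := hall n hn
          simp only [List.mem_cons, not_or] at m1 m2 m3
          refine ⟨⟨by simpa using m1.2, by simpa using m2.2, by simpa using m3.2⟩, ?_⟩
          intro j hj
          cases j with
          | zero => simp only [List.getElem_cons_zero, List.getElem_cons_succ]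
                    push_neg
                    exact ⟨m1.1, m2.1, m3.1⟩
          | succ k =>
            have := hp k (by omega)
            simpa using this
      · intro hall i hi
        obtain ⟨⟨m1, m2, m3⟩, hp⟩ := hall (i+1) (by simpa using Nat.succ_lt_succ hi)
        simp only [List.getElem_cons_succ] at m1 m2 m3 hp
        have h0 := hp 0 (by omega)
        simp only [List.getElem_cons_zero] at h0
        push_neg at h0
        refine ⟨⟨?_, ?_, ?_⟩, ?_⟩
        · simp only [List.mem_cons, not_or]; exact ⟨h0.1, m1⟩
        · simp only [List.mem_cons, not_or]; exact ⟨h0.2.1, m2⟩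
        · simp only [List.mem_cons, not_or]; exact ⟨h0.2.2, m3⟩
        · intro j hj
          have := hp (j+1) (by omega)
          simpa using this

-- ===== VERDICT (by name: the statement is the Claim_ definition above) =====
theorem eh_valida_spec : Claim_equal_eh_valida := by
  intro s _
  unfold Spec_eh_valida
  by_cases hg : s = [] ∨ (s.length : Int) ≠ 8
  · simp only [eh_valida, eh_valida_alt, if_pos hg]
  · simp only [eh_valida, eh_valida_alt, if_neg hg]
    push_neg at hg
    have h8 : s.length = 8 := by
      have := hg.2; exact_mod_cast this
    rw [loop_eq_loopC (PySem.List.enumerate s 0) PySem.Set.empty [] PySem.Set.empty []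
          PySem.Set.empty [] (fun _ => Iff.rfl) (fun _ => Iff.rfl) (fun _ => Iff.rfl)]
    rw [Bool.eq_iff_iff]
    rw [loopC_iff]
    simp only [List.all_eq_true, PySem.List.mem_pyRange_one, Bool.not_eq_true',
      Bool.or_eq_false_iff, beq_eq_false_iff_ne, ne_eq,
      PySem.List.getElem_enumerate, PySem.List.length_enumerate,
      List.not_mem_nil, not_false_eq_true, true_and, and_true, h8]
    constructor
    · intro hA i hi j hj
      have key := hA (j : Int) ⟨by omega, by omega⟩ (i : Int) ⟨by omega, by omega⟩
      simp only [PySem.List.pyGetD_natCast] at key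
      rw [List.getD_eq_getElem s 0 (by omega), List.getD_eq_getElem s 0 (by omega)] at key
      obtain ⟨hne, hab⟩ := key
      push_neg
      omega
    · intro hB i ⟨hi0, hi8⟩ j ⟨hj1, hj8⟩
      have hjn : ((j.toNat : Nat) : Int) = j := Int.toNat_of_nonneg (by omega)
      have hin : ((i.toNat : Nat) : Int) = i := Int.toNat_of_nonneg hi0
      have key := hB j.toNat (by omega) i.toNat (by omega)
      push_neg at key
      obtain ⟨hne, hd1, hd2⟩ := key
      rw [← hin, ← hjn]
      simp only [PySem.List.pyGetD_natCast] at *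
      rw [List.getD_eq_getElem s 0 (by omega), List.getD_eq_getElem s 0 (by omega)]
      push_neg
      constructor
      · omega
      · intro hab
        rcases Int.natAbs_eq (s[i.toNat] - s[j.toNat]) with he | he <;>
          rcases Int.natAbs_eq ((i.toNat : Int) - (j.toNat : Int)) with hd | hd <;> omega
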